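-- pv_equiv track=rewrite | github.com/worldEngineDev/DexUMI | dexumi/common/utility/parallel.py | assign_task_bounds_to_gpus
-- ===== SOURCE A (Python) =====
-- def assign_task_bounds_to_gpus(n_tasks, n_gpus, start_id=0):
--     """
--     Assigns task ID bounds to GPUs as evenly as possible.
--
--     Parameters:
--     n_tasks (int): Number of tasks to be distributed.
--     n_gpus (int): Number of GPUs available.
--     start_id (int): Starting task ID (default: 0)
--
--     Returns:
--     list: A list of tuples where each tuple represents the lower (inclusive)
--           and upper (exclusive) bounds of task IDs for that GPU.
--     """
--     # Calculate the base number of tasks per GPU and the remainder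
--     tasks_per_gpu = n_tasks // n_gpus
--     remainder = n_tasks % n_gpus
--
--     # Distribute tasks to GPUs
--     task_bounds = []
--     current_id = start_id
--     for i in range(n_gpus):
--         # Determine the number of tasks for this GPU
--         num_tasks = tasks_per_gpu + (1 if i < remainder else 0)
--         # Assign the bounds
--         task_bounds.append((current_id, current_id + num_tasks))
--         # Update the current ID for the next GPU
--         current_id += num_tasks
--
--     return task_bounds
-- ===== SOURCE B (Python) =====
-- def assign_task_bounds_to_gpus(n_tasks, n_gpus, start_id=0):
--     """Same contract as A: closed-form cut points instead of a running accumulator."""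
--     base = n_tasks // n_gpus
--     rem = n_tasks % n_gpus
--     bounds = [start_id + i * base + min(i, rem) for i in range(n_gpus + 1)]
--     return list(zip(bounds, bounds[1:]))
-- ===== Notes on version B (the rewrite author's own statement) =====
-- stated objective: simpler
-- what changed: B computes every cut point directly by the closed form start_id + i*base + min(i, rem) and zips consecutive bounds, instead of threading a current_id accumulator through a loop.
import Mathlib
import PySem

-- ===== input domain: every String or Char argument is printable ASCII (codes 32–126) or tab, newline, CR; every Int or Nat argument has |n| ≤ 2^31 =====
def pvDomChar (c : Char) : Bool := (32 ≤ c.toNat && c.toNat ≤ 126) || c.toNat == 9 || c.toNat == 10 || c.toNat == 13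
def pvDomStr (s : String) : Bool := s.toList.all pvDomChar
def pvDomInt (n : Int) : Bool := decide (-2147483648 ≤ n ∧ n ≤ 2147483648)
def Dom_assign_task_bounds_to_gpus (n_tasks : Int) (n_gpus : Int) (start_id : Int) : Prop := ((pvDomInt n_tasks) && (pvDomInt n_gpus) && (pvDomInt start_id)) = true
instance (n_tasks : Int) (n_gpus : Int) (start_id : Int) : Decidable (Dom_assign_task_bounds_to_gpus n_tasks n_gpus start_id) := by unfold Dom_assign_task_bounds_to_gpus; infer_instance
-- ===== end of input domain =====

-- ===== PORT A =====
-- A: loop over range(n_gpus) carrying (task_bounds, current_id).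
def assign_task_bounds_to_gpus (n_tasks : Int) (n_gpus : Int) (start_id : Int) : List (Int × Int) :=
  let tasks_per_gpu := PySem.Int.floordiv n_tasks n_gpus
  let remainder := PySem.Int.mod n_tasks n_gpus
  ((PySem.List.pyRange 0 n_gpus 1).foldl
    (fun (s : List (Int × Int) × Int) i =>
      let num_tasks := tasks_per_gpu + (if i < remainder then 1 else 0)
      (s.1 ++ [(s.2, s.2 + num_tasks)], s.2 + num_tasks))
    ([], start_id)).1

-- ===== PORT B =====
-- B: closed-form bound list, zipped with its own tail.
def assign_task_bounds_to_gpus_alt (n_tasks : Int) (n_gpus : Int) (start_id : Int) : List (Int × Int) :=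
  let base := PySem.Int.floordiv n_tasks n_gpus
  let rem := PySem.Int.mod n_tasks n_gpus
  let bounds := (PySem.List.pyRange 0 (n_gpus + 1) 1).map
    (fun i => start_id + i * base + min i rem)
  bounds.zip bounds.tail

-- ===== PRECONDITION & SPEC =====
-- Pre_ excludes exactly n_gpus = 0, where the Python A raises ZeroDivisionError.
def Pre_assign_task_bounds_to_gpus (_n_tasks : Int) (n_gpus : Int) (_start_id : Int) : Prop :=
  n_gpus ≠ 0
instance (n_tasks : Int) (n_gpus : Int) (start_id : Int) : Decidable (Pre_assign_task_bounds_to_gpus n_tasks n_gpus start_id) := by unfold Pre_assign_task_bounds_to_gpus; infer_instance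

def pvWitness_assign_task_bounds_to_gpus : Int × Int × Int := (10, 3, 5)

def Spec_assign_task_bounds_to_gpus (n_tasks : Int) (n_gpus : Int) (start_id : Int) (out : List (Int × Int)) : Prop := out = assign_task_bounds_to_gpus_alt n_tasks n_gpus start_id
instance (n_tasks : Int) (n_gpus : Int) (start_id : Int) (out : List (Int × Int)) : Decidable (Spec_assign_task_bounds_to_gpus n_tasks n_gpus start_id out) := by unfold Spec_assign_task_bounds_to_gpus; infer_instance

-- ===== CLAIM (what is proved, stated in full; the proofs are below) =====
def Claim_equal_assign_task_bounds_to_gpus : Prop := ∀ (n_tasks : Int) (n_gpus : Int) (start_id : Int), Dom_assign_task_bounds_to_gpus n_tasks n_gpus start_id → Pre_assign_task_bounds_to_gpus n_tasks n_gpus start_id → Spec_assign_task_bounds_to_gpus n_tasks n_gpus start_id (assign_task_bounds_to_gpus n_tasks n_gpus start_id)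

-- ===== LEMMAS AND PROOFS =====

-- the closed-form bound function both sides are reduced to
def pvBound (base rem start : Int) (j : Int) : Int := start + j * base + min j rem

-- one step of the closed form
lemma pvBound_succ (base rem start : Int) (j : Int) :
    pvBound base rem start (j + 1)
      = pvBound base rem start j + (base + (if j < rem then 1 else 0)) := by
  unfold pvBound
  have hm : min (j + 1) rem = min j rem + (if j < rem then 1 else 0) := by
    split_ifs with h <;> omega
  rw [hm]; ring

-- A's loop, characterized by the closed form
lemma loopA_spec (base rem start : Int) (hrem : 0 ≤ rem) : ∀ (k : Nat),
    ((List.range k).map (fun (j : Nat) => (j : Int))).foldl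
      (fun (s : List (Int × Int) × Int) i =>
        (s.1 ++ [(s.2, s.2 + (base + (if i < rem then 1 else 0)))],
         s.2 + (base + (if i < rem then 1 else 0))))
      ([], start)
    = ((List.range k).map
         (fun (j : Nat) => (pvBound base rem start (j : Int), pvBound base rem start ((j : Int) + 1))),
       pvBound base rem start (k : Nat)) := by
  intro k
  induction k with
  | zero => simp [pvBound, min_eq_left hrem]
  | succ k ih =>
      rw [List.range_succ, List.map_append, List.foldl_append, ih]
      simp only [List.map_cons, List.map_nil, List.foldl_cons, List.foldl_nil]
      rw [← pvBound_succ base rem start (k : Int)]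
      push_cast
      simp

-- consecutive pairs of a mapped range', via zip with the tail
lemma zip_tail_range' {α : Type} (h : Nat → α) : ∀ (k s : Nat),
    ((List.range' s (k + 1)).map h).zip (((List.range' s (k + 1)).map h).tail)
      = (List.range' s k).map (fun j => (h j, h (j + 1))) := by
  intro k
  induction k with
  | zero => intro s; simp
  | succ k ih =>
      intro s
      have e1 : List.range' s (k + 1 + 1) = s :: List.range' (s + 1) (k + 1) := by
        rw [List.range'_succ]
      have e2 : List.range' s (k + 1) = s :: List.range' (s + 1) k := by
        rw [List.range'_succ]
      have e3 : List.range' (s + 1) (k + 1) = (s + 1) :: List.range' (s + 1 + 1) k := by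
        rw [List.range'_succ]
      rw [e1, e2, List.map_cons, List.map_cons, List.tail_cons]
      have ihs := ih (s + 1)
      rw [e3] at ihs ⊢
      simp only [List.map_cons, List.tail_cons, List.zip_cons_cons] at ihs ⊢
      rw [ihs]

-- ===== VERDICT (by name: the statement is the Claim_ definition above) =====
theorem assign_task_bounds_to_gpus_spec : Claim_equal_assign_task_bounds_to_gpus := by
  intro n_tasks n_gpus start_id _ hpre
  unfold Spec_assign_task_bounds_to_gpus assign_task_bounds_to_gpus assign_task_bounds_to_gpus_alt
  rcases lt_or_gt_of_ne hpre with hneg | hpos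
  · -- n_gpus < 0: both sides are empty
    rw [PySem.List.pyRange_one_eq_nil (by omega), PySem.List.pyRange_one_eq_nil (by omega)]
    simp
  · -- n_gpus > 0
    set base := PySem.Int.floordiv n_tasks n_gpus with hbase
    set rem := PySem.Int.mod n_tasks n_gpus with hrem
    have hrnn : 0 ≤ rem := PySem.Int.mod_nonneg n_tasks hpos
    set k := n_gpus.toNat with hk
    have hng : n_gpus = (k : Int) := by omega
    rw [hng, PySem.List.pyRange_one, PySem.List.pyRange_one]
    have hkk : (((k : Int) + 1) - 0).toNat = k + 1 := by omega
    have hkk' : (((k : Int)) - 0).toNat = k := by omega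
    rw [hkk, hkk']
    simp only [zero_add]
    rw [loopA_spec base rem start_id hrnn k]
    rw [List.map_map]
    have hz := zip_tail_range'
      ((fun i : Int => start_id + i * base + min i rem) ∘ (fun j : Nat => (j : Int))) k 0
    rw [← List.range_eq_range', ← List.range_eq_range'] at hz
    rw [hz]
    simp only [Function.comp]
    refine List.map_congr_left (fun j _ => ?_)
    simp only [pvBound]
    push_cast
    ring_nf
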